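-- pv_equiv track=rewrite | github.com/maldonadoq/tgraphic | otsu/src/utils.py | threshold_range
-- ===== SOURCE A (Python) =====
-- def threshold_range(T):
--     r = []
--     s = len(T) - 1
--
--     r.append([0, int(T[0])])
--     for i in range(s):
--         r.append([int(T[i]),int(T[i+1])])
--     r.append([int(T[s]), 256])
--
--     return r
-- ===== SOURCE B (Python) =====
-- def threshold_range(T):
--     # Single forward pass carrying the previous boundary as an accumulator:
--     # each threshold closes the open range [prev, t]; the final append closes
--     # the last open range at 256. No indexing, no special-cased first entry.
--     out = []
--     prev = 0
--     for t in T: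
--         t = int(t)
--         out.append([prev, t])
--         prev = t
--     out.append([prev, 256])
--     return out
-- ===== Notes on version B (the rewrite author's own statement) =====
-- stated objective: alternative
-- what changed: B replaces A's index-based loop with special-cased head and tail appends by one accumulator pass that carries the previous boundary, emitting [prev, t] per element and closing the last range at 256, with no indexing at all.
-- outside the precondition, e.g. on threshold_range([]): A raises IndexError, B returns [[0, 256]]
import Mathlib
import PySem

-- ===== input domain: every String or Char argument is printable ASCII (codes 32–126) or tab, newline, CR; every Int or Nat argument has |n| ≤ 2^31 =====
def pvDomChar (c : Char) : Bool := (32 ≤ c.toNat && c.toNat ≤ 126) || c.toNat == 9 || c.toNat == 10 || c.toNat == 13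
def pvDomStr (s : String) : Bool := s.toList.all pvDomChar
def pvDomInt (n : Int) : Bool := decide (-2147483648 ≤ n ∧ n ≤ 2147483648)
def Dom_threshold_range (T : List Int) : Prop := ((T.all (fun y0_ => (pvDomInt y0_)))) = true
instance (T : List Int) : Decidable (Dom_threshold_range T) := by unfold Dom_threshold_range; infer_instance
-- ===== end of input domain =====

-- B replaces A's index loop with special-cased head/tail appends by a structural
-- recursion carrying the previous boundary as an accumulator (objective: alternative).
-- Pre_ excludes the empty list, on which A raises IndexError while B returns [[0, 256]].


-- ===== PORT A =====
def threshold_range (T : List Int) : List (List Int) :=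
  let s : Int := PySem.List.len T - 1
  let r : List (List Int) := [] ++ [[0, PySem.List.pyGetD T 0 0]]
  let r := (PySem.List.pyRange 0 s 1).foldl
    (fun r i => r ++ [[PySem.List.pyGetD T i 0, PySem.List.pyGetD T (i + 1) 0]]) r
  r ++ [[PySem.List.pyGetD T s 0, 256]]

-- ===== PORT B =====
def threshold_range_alt (T : List Int) : List (List Int) :=
  let st := T.foldl (fun (s : List (List Int) × Int) t => (s.1 ++ [[s.2, t]], t)) ([], 0)
  st.1 ++ [[st.2, 256]]

-- ===== PRECONDITION & SPEC =====
-- Pre_ excludes exactly the empty list, where A raises IndexError reading T[0].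
def Pre_threshold_range (T : List Int) : Prop := T ≠ []
instance (T : List Int) : Decidable (Pre_threshold_range T) := by unfold Pre_threshold_range; infer_instance
def pvWitness_threshold_range : List Int := ([60, 120, 200])

def Spec_threshold_range (T : List Int) (out : List (List Int)) : Prop := out = threshold_range_alt T
instance (T : List Int) (out : List (List Int)) : Decidable (Spec_threshold_range T out) := by unfold Spec_threshold_range; infer_instance

-- ===== CLAIM (what is proved, stated in full; the proofs are below) =====
def Claim_equal_threshold_range : Prop := ∀ (T : List Int), Dom_threshold_range T → Pre_threshold_range T → Spec_threshold_range T (threshold_range T)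

-- ===== LEMMAS AND PROOFS =====

-- proof-only helper: the recursive view of B's accumulator pass
def tr_go (prev : Int) (rest : List Int) : List (List Int) :=
  match rest with
  | [] => [[prev, 256]]
  | x :: xs => [[prev, x]] ++ tr_go x xs

-- B's fold unrolls to tr_go
theorem alt_fold (rest : List Int) (acc : List (List Int)) (prev : Int) :
    (rest.foldl (fun (s : List (List Int) × Int) t => (s.1 ++ [[s.2, t]], t)) (acc, prev)).1
      ++ [[(rest.foldl (fun (s : List (List Int) × Int) t => (s.1 ++ [[s.2, t]], t)) (acc, prev)).2, 256]]
    = acc ++ tr_go prev rest := by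
  induction rest generalizing acc prev with
  | nil => simp [tr_go]
  | cons x xs ih =>
      simp only [List.foldl_cons, tr_go]
      rw [ih]
      simp

theorem alt_eq_go (T : List Int) : threshold_range_alt T = tr_go 0 T := by
  simpa [threshold_range_alt] using alt_fold T [] 0

-- A's middle loop plus tail entry equals B's recursion started at the first threshold.
theorem pv_mid (t : Int) (rest : List Int) :
    (List.range rest.length).map
        (fun k => [(t :: rest).getD k 0, (t :: rest).getD (k + 1) 0])
      ++ [[(t :: rest).getD rest.length 0, 256]]
    = tr_go t rest := by
  induction rest generalizing t with
  | nil => simp [tr_go]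
  | cons u rs ih =>
      simp only [List.length_cons, List.range_succ_eq_map, List.map_cons, List.map_map,
        List.getD_cons_zero, List.getD_cons_succ, tr_go, List.cons_append, List.nil_append]
      refine congrArg (fun l => [t, u] :: l) ?_
      simpa using ih u

theorem threshold_range_eq_alt (t : Int) (rest : List Int) :
    threshold_range (t :: rest) = threshold_range_alt (t :: rest) := by
  rw [alt_eq_go]
  simp only [threshold_range, PySem.List.len_eq,
    PySem.List.foldl_append_singleton_eq_map, PySem.List.pyRange_one]
  have hlen : ((t :: rest).length : Int) - 1 = (rest.length : Int) := by simp
  rw [hlen]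
  simp only [sub_zero, Int.toNat_natCast, List.map_map]
  have hmap : (List.range rest.length).map
      ((fun i => [PySem.List.pyGetD (t :: rest) i 0, PySem.List.pyGetD (t :: rest) (i + 1) 0])
        ∘ (fun k : ℕ => (0 : Int) + k))
      = (List.range rest.length).map
        (fun k => [(t :: rest).getD k 0, (t :: rest).getD (k + 1) 0]) := by
    refine List.map_congr_left (fun k _ => ?_)
    have h1 : ((k : Int)) + 1 = ((k + 1 : ℕ) : Int) := by push_cast; ring
    simp only [Function.comp, zero_add, h1, PySem.List.pyGetD_natCast]
  have htail : PySem.List.pyGetD (t :: rest) ((rest.length : Int)) 0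
      = (t :: rest).getD rest.length 0 := by
    simp [PySem.List.pyGetD_natCast]
  rw [hmap, htail]
  have hmid := pv_mid t rest
  simp only [List.nil_append, PySem.List.pyGetD_zero_cons, tr_go, List.cons_append]
  rw [← hmid]

-- ===== VERDICT (by name: the statement is the Claim_ definition above) =====
theorem threshold_range_spec : Claim_equal_threshold_range := by
  intro T _ hT
  unfold Spec_threshold_range
  cases T with
  | nil => exact absurd rfl hT
  | cons t rest => exact threshold_range_eq_alt t rest
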